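-- pv_equiv track=rewrite | github.com/ini/euler | euler.py | cubes
-- ===== SOURCE A (Python) =====
-- from typing import Any, Callable, Hashable, Iterable, Iterator
--
-- def cubes(low: int = 0, high: int = None) -> Iterator[int]:
--     """
--     Generate cube numbers in the range [low, high].
--     """
--     high = high if high is not None else float('inf')
--     i = iroot(low, 3)
--     while (n := i*i*i) < low:
--         i += 1
--     while n <= high:
--         yield n
--         n += 3*i*i + 3*i + 1
--         i += 1
--
-- def iroot(x: float, n: int = 2) -> int:
--     """
--     Find the integer n-th root of x.
--     Returns the largest integer a such that a^n <= x.
--     Uses Newton's method.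
--     """
--     if x < 0:
--         if n % 2 == 0:
--             raise ValueError("Cannot compute even root of negative number")
--         return -iroot(-x - 1, n) - 1
--     elif x == 0:
--         return 0
--
--     x = int(x)
--     a, b = x, x + 1
--     while a < b:
--         b = a
--         t = (n - 1) * b + x // pow(b, n - 1)
--         a = t // n
--
--     return b
-- ===== SOURCE B (Python) =====
-- def cubes(low: int = 0, high: int = None):
--     """
--     Generate cube numbers in the range [low, high] by finding the integer
--     cube-root bounds with binary search and walking the closed index range.
--     """
--     if high is None:
--         i = _ceil_cbrt(low)
--         while True:
--             yield i * i * i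
--             i += 1
--     else:
--         for i in range(_ceil_cbrt(low), _floor_cbrt(high) + 1):
--             yield i * i * i
--
--
-- def _ceil_cbrt(v: int) -> int:
--     """Smallest integer i with i**3 >= v, by binary search."""
--     lo, hi = -abs(v) - 2, abs(v) + 2
--     while lo < hi:
--         mid = (lo + hi) // 2
--         if mid * mid * mid >= v:
--             hi = mid
--         else:
--             lo = mid + 1
--     return lo
--
--
-- def _floor_cbrt(v: int) -> int:
--     """Largest integer i with i**3 <= v."""
--     return -_ceil_cbrt(-v)
-- ===== Notes on version B (the rewrite author's own statement) =====
-- stated objective: alternative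
-- what changed: B replaces Newton-iteration cube root plus an incremental generator that maintains the running cube via the binomial difference 3i^2+3i+1 by two binary searches for the integer cube-root bounds of [low, high] and a plain for-loop over range(ceil_cbrt(low), floor_cbrt(high)+1) that recomputes i*i*i directly; Pre_ excludes high=None, where both generators are infinite (A never finishes when consumed, so no finite return value exists to compare).
import Mathlib
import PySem

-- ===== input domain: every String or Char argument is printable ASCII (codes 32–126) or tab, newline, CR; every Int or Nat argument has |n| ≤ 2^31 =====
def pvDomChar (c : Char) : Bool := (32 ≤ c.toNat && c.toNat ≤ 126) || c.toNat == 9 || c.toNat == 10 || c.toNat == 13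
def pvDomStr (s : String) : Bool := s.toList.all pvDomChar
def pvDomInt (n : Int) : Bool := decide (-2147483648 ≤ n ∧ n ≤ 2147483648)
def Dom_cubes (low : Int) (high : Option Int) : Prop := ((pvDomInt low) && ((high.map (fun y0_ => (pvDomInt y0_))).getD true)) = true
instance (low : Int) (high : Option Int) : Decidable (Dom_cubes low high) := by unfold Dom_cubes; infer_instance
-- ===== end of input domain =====

-- B replaces A's Newton cube root + incremental binomial-difference generator by binary-searched
-- cube-root bounds and a direct map over the index range (objective: alternative algorithm, same cost).
-- Both Pythons are generators; the ports model the finite list of yielded values (high = None, where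
-- the generators are infinite, is excluded by Pre_cubes).

-- ===== PORT A =====

-- Totality lemma cited by irootLoop's recursive call (the Newton iterate stays ≥ 1); it adds no
-- computation, only the proof that the transliterated loop terminates.
theorem newton_step_one (x n a : Int) (hn : 2 ≤ n) (hx : 1 ≤ x) (ha : 1 ≤ a) :
    1 ≤ PySem.Int.floordiv ((n - 1) * a + PySem.Int.floordiv x (a ^ (n - 1).toNat)) n := by
  have hpow : (0:Int) < a ^ (n - 1).toNat := pow_pos (by omega) _
  have hq : 0 ≤ PySem.Int.floordiv x (a ^ (n - 1).toNat) := by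
    rw [PySem.Int.floordiv_eq_ediv_of_pos hpow]
    exact Int.ediv_nonneg (by omega) (le_of_lt hpow)
  rw [PySem.Int.le_floordiv_iff_mul_le (by omega : (0:Int) < n)]
  rcases eq_or_lt_of_le ha with h1 | h2
  · have hp1 : a ^ (n - 1).toNat = 1 := by rw [← h1]; simp
    have hq' : PySem.Int.floordiv x (a ^ (n - 1).toNat) = x := by
      rw [hp1, PySem.Int.floordiv_eq_ediv_of_pos (by norm_num)]; exact Int.ediv_one x
    rw [hq', ← h1]
    nlinarith
  · nlinarith [mul_nonneg (by omega : (0:Int) ≤ n - 1) (by omega : (0:Int) ≤ a - 2)]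

-- Python:  while a < b: b = a; t = (n-1)*b + x // pow(b, n-1); a = t // n   (then return b)
-- The three Prop arguments only establish termination; the computation is the literal loop.
def irootLoop (x n a b : Int) (hn : 2 ≤ n) (hx : 1 ≤ x) (ha : 1 ≤ a) : Int :=
  if h : a < b then
    irootLoop x n (PySem.Int.floordiv ((n - 1) * a + PySem.Int.floordiv x (a ^ (n - 1).toNat)) n) a
      hn hx (newton_step_one x n a hn hx ha)
  else b
termination_by b.toNat
decreasing_by omega

-- Python iroot.  The negative/even branch raises ValueError and n ≤ 1 leaves the int contract
-- (Python pow with negative exponent yields a float); both are unreachable from cubes (n = 3).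
def iroot (x n : Int) : Int :=
  if hx0 : x < 0 then
    if PySem.Int.mod n 2 == 0 then 0  -- Python: raise ValueError (unreachable from cubes)
    else -iroot (-x - 1) n - 1
  else if hx1 : x = 0 then 0
  else if hn : 2 ≤ n then irootLoop x n x (x + 1) hn (by omega) (by omega)
  else 0  -- n ≤ 1: outside iroot's int contract (unreachable from cubes)
termination_by (if x < 0 then 1 else 0 : Nat)
decreasing_by split_ifs <;> omega

-- Python:  while (n := i*i*i) < low: i += 1     (returns the final i; n = i*i*i at exit)
def ascend (low i : Int) : Int :=
  if h : i * i * i < low then ascend low (i + 1) else i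
termination_by (low - i * i * i).toNat
decreasing_by
  have key : i * i * i < (i + 1) * (i + 1) * (i + 1) := by nlinarith [sq_nonneg (2 * i + 1)]
  have h1 : (0:Int) < low - i * i * i := by linarith
  have h2 : low - (i + 1) * (i + 1) * (i + 1) < low - i * i * i := by linarith
  generalize hA : low - (i + 1) * (i + 1) * (i + 1) = A at h2
  generalize hB : low - i * i * i = B at h1 h2
  omega

-- Python:  while n <= high: yield n; n += 3*i*i + 3*i + 1; i += 1
def emit (hI n i : Int) : List Int :=
  if h : n ≤ hI then n :: emit hI (n + 3 * i * i + 3 * i + 1) (i + 1) else []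
termination_by (hI + 1 - n).toNat
decreasing_by
  have key : (0:Int) < 3 * i * i + 3 * i + 1 := by nlinarith [sq_nonneg (2 * i + 1)]
  have h1 : (0:Int) < hI + 1 - n := by linarith
  have h2 : hI + 1 - (n + 3 * i * i + 3 * i + 1) < hI + 1 - n := by linarith
  generalize hA : hI + 1 - (n + 3 * i * i + 3 * i + 1) = A at h2
  generalize hB : hI + 1 - n = B at h1 h2
  omega

def cubes (low : Int) (high : Option Int) : List Int :=
  match high with
  | none => []  -- Python: high = float('inf'); the generator is infinite — excluded by Pre_cubes
  | some hI =>
    let i0 := iroot low 3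
    let c := ascend low i0
    emit hI (c * c * c) c

-- ===== PORT B =====

-- Source B _ceil_cbrt's binary-search loop:  while lo < hi: mid = (lo+hi)//2; ...
def bsearch (v lo hi : Int) : Int :=
  if h : lo < hi then
    let mid := PySem.Int.floordiv (lo + hi) 2
    if v ≤ mid * mid * mid then bsearch v lo mid else bsearch v (mid + 1) hi
  else lo
termination_by (hi - lo).toNat
decreasing_by
  · have hb := PySem.Int.floordiv_two_mid_bounds (le_of_lt h)
    have hlt : PySem.Int.floordiv (lo + hi) 2 < hi := by
      rw [PySem.Int.floordiv_lt_iff_lt_mul (by norm_num)]; omega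
    generalize PySem.Int.floordiv (lo + hi) 2 = m at hb hlt ⊢
    omega
  · have hb := PySem.Int.floordiv_two_mid_bounds (le_of_lt h)
    generalize PySem.Int.floordiv (lo + hi) 2 = m at hb ⊢
    omega

def ceilCbrt (v : Int) : Int := bsearch v (-|v| - 2) (|v| + 2)

def floorCbrt (v : Int) : Int := -ceilCbrt (-v)

def cubes_alt (low : Int) (high : Option Int) : List Int :=
  match high with
  | none => []  -- Source B's `while True` branch: infinite generator — excluded by Pre_cubes
  | some hI => (PySem.List.pyRange (ceilCbrt low) (floorCbrt hI + 1) 1).map (fun i => i * i * i)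

-- ===== PRECONDITION & SPEC =====
-- Pre_ excludes only high = None: there both generators are infinite, so A never returns a finite list.
def Pre_cubes (low : Int) (high : Option Int) : Prop := high ≠ none
instance (low : Int) (high : Option Int) : Decidable (Pre_cubes low high) := by unfold Pre_cubes; infer_instance

def pvWitness_cubes : Int × Option Int := (-30, some 30)

def Spec_cubes (low : Int) (high : Option Int) (out : List Int) : Prop := out = cubes_alt low high
instance (low : Int) (high : Option Int) (out : List Int) : Decidable (Spec_cubes low high out) := by unfold Spec_cubes; infer_instance

-- ===== CLAIM (what is proved, stated in full; the proofs are below) =====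
def Claim_equal_cubes : Prop := ∀ (low : Int) (high : Option Int), Dom_cubes low high → Pre_cubes low high → Spec_cubes low high (cubes low high)

-- ===== LEMMAS AND PROOFS =====

theorem cube_lt_cube {a b : Int} (h : a < b) : a * a * a < b * b * b := by
  nlinarith [sq_nonneg (a + b), sq_nonneg a, sq_nonneg b, sq_nonneg (a - b)]

theorem cube_le_cube {a b : Int} (h : a ≤ b) : a * a * a ≤ b * b * b := by
  rcases eq_or_lt_of_le h with rfl | h'
  · exact le_rfl
  · exact le_of_lt (cube_lt_cube h')

theorem le_of_cube_le {a b : Int} (h : a * a * a ≤ b * b * b) : a ≤ b := by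
  by_contra hab
  exact absurd (cube_lt_cube (by omega : b < a)) (by omega)

theorem bsearch_spec (v : Int) : ∀ (N : Nat) (lo hi : Int), (hi - lo).toNat ≤ N → lo ≤ hi →
    (lo - 1) * (lo - 1) * (lo - 1) < v → v ≤ hi * hi * hi →
    (bsearch v lo hi - 1) * (bsearch v lo hi - 1) * (bsearch v lo hi - 1) < v ∧
      v ≤ bsearch v lo hi * (bsearch v lo hi) * (bsearch v lo hi) := by
  intro N
  induction N with
  | zero =>
    intro lo hi hN hle hlo hhi
    have heq : lo = hi := by omega
    subst heq
    rw [bsearch]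
    simp only [lt_self_iff_false, dite_false]
    exact ⟨hlo, hhi⟩
  | succ N ih =>
    intro lo hi hN hle hlo hhi
    rw [bsearch]
    by_cases h : lo < hi
    · rw [dif_pos h]
      have hb := PySem.Int.floordiv_two_mid_bounds (le_of_lt h)
      have hlt : PySem.Int.floordiv (lo + hi) 2 < hi := by
        rw [PySem.Int.floordiv_lt_iff_lt_mul (by norm_num)]; omega
      set m := PySem.Int.floordiv (lo + hi) 2 with hm
      by_cases hc : v ≤ m * m * m
      · rw [if_pos hc]
        exact ih lo m (by omega) hb.1 hlo hc
      · rw [if_neg hc]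
        refine ih (m + 1) hi (by omega) (by omega) ?_ hhi
        have : m + 1 - 1 = m := by ring
        rw [this]; omega
    · rw [dif_neg h]
      have heq : lo = hi := by omega
      subst heq
      exact ⟨hlo, hhi⟩

theorem ceilCbrt_spec (v : Int) :
    (ceilCbrt v - 1) * (ceilCbrt v - 1) * (ceilCbrt v - 1) < v ∧
      v ≤ ceilCbrt v * ceilCbrt v * ceilCbrt v := by
  have h0 : (0:Int) ≤ |v| := abs_nonneg v
  have h1 : -|v| ≤ v := neg_abs_le v
  have h2 : v ≤ |v| := le_abs_self v
  unfold ceilCbrt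
  refine bsearch_spec v (|v| + 2 - (-|v| - 2)).toNat (-|v| - 2) (|v| + 2) le_rfl (by omega) ?_ ?_
  · nlinarith
  · nlinarith

theorem floorCbrt_spec (v : Int) :
    floorCbrt v * floorCbrt v * floorCbrt v ≤ v ∧
      v < (floorCbrt v + 1) * (floorCbrt v + 1) * (floorCbrt v + 1) := by
  obtain ⟨hc1, hc2⟩ := ceilCbrt_spec (-v)
  unfold floorCbrt
  constructor
  · nlinarith
  · nlinarith

theorem newton_inv_step (x b : Int) (hx : 1 ≤ x) (hb : 1 ≤ b)
    (s : Int) (hs : s * s * s ≤ x) :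
    s ≤ PySem.Int.floordiv ((3 - 1) * b + PySem.Int.floordiv x (b ^ ((3:Int) - 1).toNat)) 3 := by
  have h31 : ((3:Int) - 1) = 2 := by norm_num
  have hpow : b ^ ((3:Int) - 1).toNat = b * b := by
    norm_num
    exact pow_two b
  have hb2 : (0:Int) < b * b := by positivity
  rw [hpow, h31]
  by_cases hs1 : s ≤ 0
  · have hq : 0 ≤ PySem.Int.floordiv x (b * b) := by
      rw [PySem.Int.floordiv_eq_ediv_of_pos hb2]
      exact Int.ediv_nonneg (by omega) (le_of_lt hb2)
    have hres : 0 ≤ PySem.Int.floordiv (2 * b + PySem.Int.floordiv x (b * b)) 3 := by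
      rw [PySem.Int.floordiv_eq_ediv_of_pos (by norm_num : (0:Int) < 3)]
      exact Int.ediv_nonneg (by omega) (by norm_num)
    omega
  · have hsp : (1:Int) ≤ s := by omega
    have e : 0 ≤ (b - s) * (b - s) * (2 * b + s) :=
      mul_nonneg (mul_self_nonneg _) (by omega)
    have key : b * b * (3 * s - 2 * b) ≤ x := by nlinarith
    have hq : 3 * s - 2 * b ≤ PySem.Int.floordiv x (b * b) := by
      rw [PySem.Int.le_floordiv_iff_mul_le hb2]
      nlinarith
    rw [PySem.Int.le_floordiv_iff_mul_le (by norm_num : (0:Int) < 3)]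
    linarith

theorem irootLoop_spec (x : Int) (hx : 1 ≤ x) :
    ∀ (N : Nat) (a b : Int) (ha : 1 ≤ a), b.toNat ≤ N → 1 ≤ b →
    (∀ s : Int, s * s * s ≤ x → s ≤ a) → (∀ s : Int, s * s * s ≤ x → s ≤ b) →
    (a < b ∨ a = PySem.Int.floordiv ((3 - 1) * b + PySem.Int.floordiv x (b ^ ((3:Int) - 1).toNat)) 3) →
    irootLoop x 3 a b (by norm_num) hx ha * irootLoop x 3 a b (by norm_num) hx ha * irootLoop x 3 a b (by norm_num) hx ha ≤ x ∧
      (∀ s : Int, s * s * s ≤ x → s ≤ irootLoop x 3 a b (by norm_num) hx ha) := by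
  intro N
  induction N with
  | zero =>
    intro a b ha hN hb hIa hIb hab
    omega
  | succ N ih =>
    intro a b ha hN hb hIa hIb hab
    rw [irootLoop]
    by_cases h : a < b
    · rw [dif_pos h]
      exact ih (PySem.Int.floordiv ((3 - 1) * a + PySem.Int.floordiv x (a ^ ((3:Int) - 1).toNat)) 3) a
        (newton_step_one x 3 a (by norm_num) hx ha) (by omega) ha
        (fun s hs => newton_inv_step x a hx ha s hs) hIa (Or.inr rfl)
    · rw [dif_neg h]
      refine ⟨?_, hIb⟩
      rcases hab with hab | hab
      · exact absurd hab h
      · -- a = f b and b ≤ a:  b*3 ≤ 2*b + x // (b*b), hence b*b*b ≤ x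
        have h31 : ((3:Int) - 1) = 2 := by norm_num
        have hpow : b ^ ((3:Int) - 1).toNat = b * b := by norm_num; exact pow_two b
        rw [hpow, h31] at hab
        have hb2 : (0:Int) < b * b := by positivity
        have hge : b ≤ PySem.Int.floordiv (2 * b + PySem.Int.floordiv x (b * b)) 3 := by omega
        rw [PySem.Int.le_floordiv_iff_mul_le (by norm_num : (0:Int) < 3)] at hge
        have hq : b ≤ PySem.Int.floordiv x (b * b) := by linarith
        rw [PySem.Int.le_floordiv_iff_mul_le hb2] at hq
        nlinarith

theorem iroot3_spec_nonneg (x : Int) (hx : 0 ≤ x) :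
    iroot x 3 * iroot x 3 * iroot x 3 ≤ x ∧ ∀ s : Int, s * s * s ≤ x → s ≤ iroot x 3 := by
  rcases eq_or_lt_of_le hx with h0 | h1
  · rw [iroot]
    have hn0 : ¬ x < 0 := by omega
    have hx0 : x = 0 := h0.symm
    simp only [dif_neg hn0, dif_pos hx0]
    refine ⟨by omega, fun s hs => ?_⟩
    by_contra hc
    have h1s : (1:Int) ≤ s := by omega
    nlinarith
  · rw [iroot]
    have hn0 : ¬ x < 0 := by omega
    have hx0 : ¬ x = 0 := by omega
    simp only [dif_neg hn0, dif_neg hx0, dif_pos (by norm_num : (2:Int) ≤ 3)]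
    have hIa : ∀ s : Int, s * s * s ≤ x → s ≤ x := by
      intro s hs
      by_cases h1s : (1:Int) ≤ s
      · nlinarith
      · omega
    exact irootLoop_spec x (by omega) (x + 1).toNat x (x + 1) (by omega) le_rfl (by omega)
      hIa (fun s hs => by have := hIa s hs; omega) (Or.inl (by omega))

theorem iroot3_cube_le (low : Int) : iroot low 3 * iroot low 3 * iroot low 3 ≤ low := by
  rcases lt_or_ge low 0 with hneg | hpos
  · rw [iroot]
    have hmod : (PySem.Int.mod 3 2 == 0) = false := by decide
    simp only [dif_pos hneg, hmod, Bool.false_eq_true, if_false]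
    obtain ⟨h1, h2⟩ := iroot3_spec_nonneg (-low - 1) (by omega)
    set s := iroot (-low - 1) 3 with hs
    have h3 : ¬ (s + 1) * (s + 1) * (s + 1) ≤ -low - 1 := by
      intro hc
      have := h2 (s + 1) hc
      omega
    have h4 : -low - 1 < (s + 1) * (s + 1) * (s + 1) := not_le.mp h3
    nlinarith [h4]
  · exact (iroot3_spec_nonneg low hpos).1

theorem ascend_eq (low c : Int) (hc2 : low ≤ c * c * c) (hc1 : (c - 1) * (c - 1) * (c - 1) < low) :
    ∀ (N : Nat) (i : Int), i ≤ c → (c - i).toNat ≤ N → ascend low i = c := by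
  intro N
  induction N with
  | zero =>
    intro i hi hN
    have heq : i = c := by omega
    subst heq
    rw [ascend, dif_neg (by omega : ¬ i * i * i < low)]
  | succ N ih =>
    intro i hi hN
    rcases eq_or_lt_of_le hi with heq | hlt
    · subst heq
      rw [ascend, dif_neg (by omega : ¬ i * i * i < low)]
    · have hcase : i * i * i < low := by
        have h1 : i * i * i ≤ (c - 1) * (c - 1) * (c - 1) := cube_le_cube (by omega)
        omega
      rw [ascend, dif_pos hcase]
      exact ih (i + 1) (by omega) (by omega)

theorem emit_eq (hI f : Int) (hfl : f * f * f ≤ hI) (hfu : hI < (f + 1) * (f + 1) * (f + 1)) :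
    ∀ (N : Nat) (i : Int), (f + 1 - i).toNat ≤ N →
      emit hI (i * i * i) i = (PySem.List.pyRange i (f + 1) 1).map (fun j => j * j * j) := by
  intro N
  induction N with
  | zero =>
    intro i hN
    have hge : f + 1 ≤ i := by omega
    have hcond : ¬ i * i * i ≤ hI := by
      have h1 : (f + 1) * (f + 1) * (f + 1) ≤ i * i * i := cube_le_cube hge
      omega
    rw [emit, dif_neg hcond, PySem.List.pyRange_one_eq_nil hge, List.map_nil]
  | succ N ih =>
    intro i hN
    by_cases hge : f + 1 ≤ i
    · have hcond : ¬ i * i * i ≤ hI := by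
        have h1 : (f + 1) * (f + 1) * (f + 1) ≤ i * i * i := cube_le_cube hge
        omega
      rw [emit, dif_neg hcond, PySem.List.pyRange_one_eq_nil hge, List.map_nil]
    · have hle : i ≤ f := by omega
      have hcond : i * i * i ≤ hI := le_trans (cube_le_cube hle) hfl
      rw [emit, dif_pos hcond, PySem.List.pyRange_one_cons (by omega : i < f + 1), List.map_cons]
      have harg : i * i * i + 3 * i * i + 3 * i + 1 = (i + 1) * (i + 1) * (i + 1) := by ring
      rw [harg]
      rw [ih (i + 1) (by omega)]

-- ===== VERDICT (by name: the statement is the Claim_ definition above) =====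
theorem cubes_spec : Claim_equal_cubes := by
  intro low high _ hpre
  unfold Spec_cubes
  match high with
  | none => exact absurd rfl hpre
  | some hI =>
    obtain ⟨hc1, hc2⟩ := ceilCbrt_spec low
    obtain ⟨hf1, hf2⟩ := floorCbrt_spec hI
    have hi0 : iroot low 3 ≤ ceilCbrt low := le_of_cube_le (le_trans (iroot3_cube_le low) hc2)
    have ha : ascend low (iroot low 3) = ceilCbrt low :=
      ascend_eq low (ceilCbrt low) hc2 hc1 (ceilCbrt low - iroot low 3).toNat (iroot low 3) hi0 le_rfl
    show cubes low (some hI) = cubes_alt low (some hI)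
    unfold cubes cubes_alt
    simp only [ha]
    exact emit_eq hI (floorCbrt hI) hf1 hf2 (floorCbrt hI + 1 - ceilCbrt low).toNat (ceilCbrt low) le_rfl
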